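-- pv_equiv track=rewrite | github.com/mrlasdt/ngrams-error-detector | tools/utils.py | trigrams_bothward
-- ===== SOURCE A (Python) =====
-- from itertools import tee, islice
--
-- def trigrams_bothward(sequence: list, mode: str):
--     '''
--     https://github.com/nltk/nltk/blob/6f18391a82ce20218f84bb4e8524a5fbaca354e9/nltk/lm/counter.py#L18
--     context, word = ngram[:-1], ngram[-1]
--
--     mode = 'forward' -> return w0 w1 w2
--     mode = 'backward -> return w2 w1 w0
--     mode = 'bothward'-> return w0 w2 w1
--     customized from nltk.utils.trigrams
--     '''
--     iterables = tee(sequence, 3)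
--     for i, sub_iterable in enumerate(iterables):  # For each window,
--         for _ in range(i):  # iterate through every order of ngrams
--             next(sub_iterable, None)  # generate the ngrams within the window
--     if mode == 'forward':
--         yield from zip(iterables[0], iterables[1], iterables[2])
--     elif mode == 'backward':
--         yield from zip(iterables[2], iterables[1], iterables[0])
--     elif mode == 'bothward':
--         yield from zip(iterables[2], iterables[0], iterables[1])
--     else:
--         raise KeyError('Invalid mode')
-- ===== SOURCE B (Python) =====
-- def trigrams_bothward(sequence: list, mode: str):
--     '''Sliding-window re-implementation: one shared pass pushes each element
--     into a 3-slot buffer and yields its entries permuted by a per-mode index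
--     triple; mode is validated lazily (on first advance), as in the original.'''
--     if mode == 'forward':
--         p, q, r = 0, 1, 2
--     elif mode == 'backward':
--         p, q, r = 2, 1, 0
--     elif mode == 'bothward':
--         p, q, r = 2, 0, 1
--     else:
--         raise KeyError('Invalid mode')
--     window = []
--     for x in sequence:
--         window.append(x)
--         if len(window) == 3:
--             yield window[p], window[q], window[r]
--             del window[0]
-- ===== Notes on version B (the rewrite author's own statement) =====
-- stated objective: alternative
-- what changed: Replaces the three tee'd offset iterators zipped per mode by one shared sliding 3-slot buffer pass whose yield is driven by a per-mode permutation triple of indices.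
import Mathlib
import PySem

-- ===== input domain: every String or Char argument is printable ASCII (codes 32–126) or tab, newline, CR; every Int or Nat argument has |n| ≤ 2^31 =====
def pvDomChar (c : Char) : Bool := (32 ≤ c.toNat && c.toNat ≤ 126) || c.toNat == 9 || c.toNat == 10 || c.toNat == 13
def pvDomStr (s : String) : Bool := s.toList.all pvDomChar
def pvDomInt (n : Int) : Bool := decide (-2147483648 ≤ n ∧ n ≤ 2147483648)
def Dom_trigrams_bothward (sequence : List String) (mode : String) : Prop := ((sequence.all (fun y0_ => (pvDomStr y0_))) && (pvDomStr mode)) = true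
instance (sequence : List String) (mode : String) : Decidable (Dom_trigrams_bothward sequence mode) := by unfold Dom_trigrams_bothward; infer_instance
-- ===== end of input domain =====

-- B replaces A's three tee'd offset iterators with one sliding 3-slot buffer pass driven by a per-mode permutation triple (alternative, same cost); equivalence is about the list of yielded triples.
-- ===== PORT A =====
-- tee(sequence, 3) with iterable i advanced i times = sequence, sequence.drop 1, sequence.drop 2
def trigrams_bothward (sequence : List String) (mode : String) : List (String × String × String) :=
  let it0 := sequence
  let it1 := sequence.drop 1
  let it2 := sequence.drop 2
  if mode == "forward" then List.zipWith3 (fun a b c => (a, b, c)) it0 it1 it2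
  else if mode == "backward" then List.zipWith3 (fun a b c => (a, b, c)) it2 it1 it0
  else if mode == "bothward" then List.zipWith3 (fun a b c => (a, b, c)) it2 it0 it1
  else []  -- raise KeyError: excluded by Pre_

-- ===== PORT B =====
-- one loop step of Source B: append x to the window; if the window is full, yield its
-- entries permuted by (p,q,r) and drop the oldest (window[p] is exact as getD:
-- p,q,r ∈ {0,1,2} and the window has length 3 at the yield)
def bStep (p q r : Nat) (st : List String × List (String × String × String)) (x : String) :
    List String × List (String × String × String) :=
  let w := st.1 ++ [x]
  if w.length == 3 then (w.drop 1, st.2 ++ [(w.getD p "", w.getD q "", w.getD r "")])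
  else (w, st.2)

def trigrams_bothward_alt (sequence : List String) (mode : String) : List (String × String × String) :=
  let pqr : Option (Nat × Nat × Nat) :=
    if mode == "forward" then some (0, 1, 2)
    else if mode == "backward" then some (2, 1, 0)
    else if mode == "bothward" then some (2, 0, 1)
    else none  -- raise KeyError: excluded by Pre_
  match pqr with
  | none => []
  | some (p, q, r) => (sequence.foldl (bStep p q r) ([], [])).2

-- ===== PRECONDITION & SPEC =====
-- A raises KeyError (on first advance) for any mode other than the three valid ones; Pre_ admits exactly the valid modes.
def Pre_trigrams_bothward (sequence : List String) (mode : String) : Prop :=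
  mode = "forward" ∨ mode = "backward" ∨ mode = "bothward"
instance (sequence : List String) (mode : String) : Decidable (Pre_trigrams_bothward sequence mode) := by unfold Pre_trigrams_bothward; infer_instance
def pvWitness_trigrams_bothward : List String × String := (["a", "b", "c", "d"], "bothward")

def Spec_trigrams_bothward (sequence : List String) (mode : String) (out : List (String × String × String)) : Prop := out = trigrams_bothward_alt sequence mode
instance (sequence : List String) (mode : String) (out : List (String × String × String)) : Decidable (Spec_trigrams_bothward sequence mode out) := by unfold Spec_trigrams_bothward; infer_instance

-- ===== CLAIM (what is proved, stated in full; the proofs are below) =====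
def Claim_equal_trigrams_bothward : Prop := ∀ (sequence : List String) (mode : String), Dom_trigrams_bothward sequence mode → Pre_trigrams_bothward sequence mode → Spec_trigrams_bothward sequence mode (trigrams_bothward sequence mode)

-- ===== LEMMAS AND PROOFS =====

-- invariant of Source B's loop: from a full-but-one window [a,b], the fold emits one
-- permuted triple per further element, i.e. a zipWith3 over the three offset tails
theorem bfold_inv (p q r : Nat) (l : List String) : ∀ (a b : String)
    (acc : List (String × String × String)),
    (l.foldl (bStep p q r) ([a, b], acc)).2
      = acc ++ List.zipWith3
          (fun x y z => ([x, y, z].getD p "", [x, y, z].getD q "", [x, y, z].getD r ""))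
          (a :: b :: l) (b :: l) l := by
  induction l with
  | nil => intro a b acc; simp [List.zipWith3]
  | cons c t ih =>
    intro a b acc
    simp only [List.foldl, List.zipWith3]
    rw [show bStep p q r ([a, b], acc) c
          = ([b, c], acc ++ [([a, b, c].getD p "", [a, b, c].getD q "", [a, b, c].getD r "")])
        from by simp [bStep]]
    rw [ih b c]
    simp

theorem flip_bwd (x y z : List String) :
    List.zipWith3 (fun a b c => ((c : String), b, a)) x y z
      = List.zipWith3 (fun a b c => (a, b, c)) z y x := by
  induction x generalizing y z with
  | nil => cases y <;> cases z <;> simp [List.zipWith3]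
  | cons a x ih => cases y <;> cases z <;> simp [List.zipWith3, ih]

theorem flip_both (x y z : List String) :
    List.zipWith3 (fun a b c => ((c : String), a, b)) x y z
      = List.zipWith3 (fun a b c => (a, b, c)) z x y := by
  induction x generalizing y z with
  | nil => cases y <;> cases z <;> simp [List.zipWith3]
  | cons a x ih => cases y <;> cases z <;> simp [List.zipWith3, ih]

-- B's fold, specialized to each mode's permutation triple
theorem bfold_main (p q r : Nat) (sequence : List String) :
    (sequence.foldl (bStep p q r) ([], [])).2
      = List.zipWith3
          (fun x y z => ([x, y, z].getD p "", [x, y, z].getD q "", [x, y, z].getD r ""))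
          sequence (sequence.drop 1) (sequence.drop 2) := by
  match sequence with
  | [] => simp
  | [a] => simp [bStep]
  | [a, b] => simp [bStep, List.zipWith3]
  | a :: b :: c :: t =>
    rw [show List.foldl (bStep p q r) ([], []) (a :: b :: c :: t)
          = List.foldl (bStep p q r) ([a, b], []) (c :: t) from by
        simp [List.foldl, bStep]]
    rw [bfold_inv p q r (c :: t) a b []]
    simp

-- ===== VERDICT (by name: the statement is the Claim_ definition above) =====
theorem trigrams_bothward_spec : Claim_equal_trigrams_bothward := by
  intro sequence mode _ hpre
  unfold Spec_trigrams_bothward trigrams_bothward trigrams_bothward_alt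
  rcases hpre with h | h | h <;> subst h <;>
    simp only [beq_self_eq_true, if_true, String.reduceBEq, Bool.false_eq_true, if_false] <;>
    rw [bfold_main]
  · rw [show (fun x y z => (([x, y, z].getD 0 ""), [x, y, z].getD 1 "", [x, y, z].getD 2 ""))
          = (fun x y z : String => (x, y, z)) from by funext x y z; simp [List.getD]]
  · rw [show (fun x y z => (([x, y, z].getD 2 ""), [x, y, z].getD 1 "", [x, y, z].getD 0 ""))
          = (fun x y z : String => (z, y, x)) from by funext x y z; simp [List.getD],
        flip_bwd]
  · rw [show (fun x y z => (([x, y, z].getD 2 ""), [x, y, z].getD 0 "", [x, y, z].getD 1 ""))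
          = (fun x y z : String => (z, x, y)) from by funext x y z; simp [List.getD],
        flip_both]
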